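-- pv_equiv track=rewrite | github.com/LuooChen/mmclassification | my_scripts/dataset/split_main_7_prop_dataset.py | get_classes_counter
-- ===== SOURCE A (Python) =====
-- main_7_props = ['upperLength', 'clothesStyles', 'hairStyles', 'lowerLength', 'lowerStyles', 'shoesStyles', 'towards']
--
-- def get_classes_counter(data_info, classes_list, class_to_idx_map):
--     # count classes
--     classes_counter = [0 for class_idx in range(len(classes_list))]
--     for row in data_info:
--         for _prop in main_7_props:
--             class_full_name = _prop + '_' + row[_prop]
--             class_idx = class_to_idx_map[class_full_name]
--             classes_counter[class_idx] = classes_counter[class_idx] + 1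
--     return classes_counter
-- ===== SOURCE B (Python) =====
-- # B: two-pass build-then-scatter — flatten all full class names, build a frequency
-- # dict once, then add each name's total into the result slot (alternative shape,
-- # no asymptotic change).
-- main_7_props = ['upperLength', 'clothesStyles', 'hairStyles', 'lowerLength', 'lowerStyles', 'shoesStyles', 'towards']
--
-- def get_classes_counter(data_info, classes_list, class_to_idx_map):
--     names = [_prop + '_' + row[_prop] for row in data_info for _prop in main_7_props]
--     counts = {}
--     for name in names:
--         counts[name] = counts.get(name, 0) + 1
--     result = [0] * len(classes_list)
--     for name, n in counts.items():
--         result[class_to_idx_map[name]] += n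
--     return result
-- ===== Notes on version B (the rewrite author's own statement) =====
-- stated objective: alternative
-- what changed: Instead of incrementing the index-list cell inside the row/property double loop, B flattens all full class names into one list, builds a name-keyed frequency dict in a single pass, and then scatters each name's total count into the result list in a second pass over the dict items.
import Mathlib
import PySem

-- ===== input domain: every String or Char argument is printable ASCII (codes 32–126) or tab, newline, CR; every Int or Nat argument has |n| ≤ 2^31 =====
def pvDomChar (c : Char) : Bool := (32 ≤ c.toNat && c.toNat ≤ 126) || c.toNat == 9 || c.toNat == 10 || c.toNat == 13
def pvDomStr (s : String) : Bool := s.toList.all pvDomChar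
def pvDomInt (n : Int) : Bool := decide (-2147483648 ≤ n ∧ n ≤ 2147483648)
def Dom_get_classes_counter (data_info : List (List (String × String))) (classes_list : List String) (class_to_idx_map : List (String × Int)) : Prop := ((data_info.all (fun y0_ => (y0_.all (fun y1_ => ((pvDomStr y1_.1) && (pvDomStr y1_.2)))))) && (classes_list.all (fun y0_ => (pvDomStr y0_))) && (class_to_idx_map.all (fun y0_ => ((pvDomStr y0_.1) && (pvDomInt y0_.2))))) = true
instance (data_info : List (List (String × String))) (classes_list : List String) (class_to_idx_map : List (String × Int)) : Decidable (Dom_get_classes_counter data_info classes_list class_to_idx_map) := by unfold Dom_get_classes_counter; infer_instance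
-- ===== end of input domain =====

-- B replaces A's in-loop index increments by a two-pass build-then-scatter over a
-- name-keyed frequency dict (alternative decomposition, same asymptotic cost).


-- module constant main_7_props (shared by both Pythons)
def pvMainProps : List String :=
  ["upperLength", "clothesStyles", "hairStyles", "lowerLength", "lowerStyles", "shoesStyles", "towards"]

-- ===== PORT A =====
def get_classes_counter (data_info : List (List (String × String))) (classes_list : List String) (class_to_idx_map : List (String × Int)) : List Int :=
  let classes_counter : List Int := (List.range classes_list.length).map (fun _ => 0)
  data_info.foldl
    (fun classes_counter row =>
      pvMainProps.foldl
        (fun classes_counter _prop =>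
          let class_full_name := _prop ++ "_" ++ (PySem.Dict.ofList row).getD _prop ""
          let class_idx := (PySem.Dict.ofList class_to_idx_map).getD class_full_name 0
          PySem.List.pySetD classes_counter class_idx
            (PySem.List.pyGetD classes_counter class_idx 0 + 1))
        classes_counter)
    classes_counter

-- ===== PORT B =====
def get_classes_counter_alt (data_info : List (List (String × String))) (classes_list : List String) (class_to_idx_map : List (String × Int)) : List Int :=
  let names : List String :=
    data_info.flatMap (fun row =>
      pvMainProps.map (fun _prop => _prop ++ "_" ++ (PySem.Dict.ofList row).getD _prop ""))
  let counts : PySem.Dict String Int :=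
    names.foldl (fun counts name => counts.insert name (counts.getD name 0 + 1)) PySem.Dict.empty
  counts.items.foldl
    (fun result kv =>
      let i := (PySem.Dict.ofList class_to_idx_map).getD kv.1 0
      PySem.List.pySetD result i (PySem.List.pyGetD result i 0 + kv.2))
    (List.replicate classes_list.length 0)

-- ===== PRECONDITION & SPEC =====
-- Pre_: exactly the inputs on which the Python A returns normally — every row has all
-- 7 properties (else KeyError), every full name is in class_to_idx_map (else KeyError),
-- and the mapped index is a valid Python index of the counter list (else IndexError).
def Pre_get_classes_counter (data_info : List (List (String × String))) (classes_list : List String) (class_to_idx_map : List (String × Int)) : Prop :=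
  (data_info.all (fun row =>
    pvMainProps.all (fun _prop =>
      match (PySem.Dict.ofList row).get? _prop with
      | none => false
      | some v =>
        match (PySem.Dict.ofList class_to_idx_map).get? (_prop ++ "_" ++ v) with
        | none => false
        | some i => decide (PySem.Raise.InRange classes_list.length i)))) = true
instance (data_info : List (List (String × String))) (classes_list : List String) (class_to_idx_map : List (String × Int)) : Decidable (Pre_get_classes_counter data_info classes_list class_to_idx_map) := by unfold Pre_get_classes_counter; infer_instance

def pvWitness_get_classes_counter : (List (List (String × String))) × List String × (List (String × Int)) := ([], ["c0"], [("k", 0)])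

def Spec_get_classes_counter (data_info : List (List (String × String))) (classes_list : List String) (class_to_idx_map : List (String × Int)) (out : List Int) : Prop := out = get_classes_counter_alt data_info classes_list class_to_idx_map
instance (data_info : List (List (String × String))) (classes_list : List String) (class_to_idx_map : List (String × Int)) (out : List Int) : Decidable (Spec_get_classes_counter data_info classes_list class_to_idx_map out) := by unfold Spec_get_classes_counter; infer_instance

-- ===== CLAIM (what is proved, stated in full; the proofs are below) =====
def Claim_equal_get_classes_counter : Prop := ∀ (data_info : List (List (String × String))) (classes_list : List String) (class_to_idx_map : List (String × Int)), Dom_get_classes_counter data_info classes_list class_to_idx_map → Pre_get_classes_counter data_info classes_list class_to_idx_map → Spec_get_classes_counter data_info classes_list class_to_idx_map (get_classes_counter data_info classes_list class_to_idx_map)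

-- ===== LEMMAS AND PROOFS =====

-- "add a at Python index i of r" — the cell update both ports perform
def pvAdd (r : List Int) (i a : Int) : List Int :=
  PySem.List.pySetD r i (PySem.List.pyGetD r i 0 + a)

theorem pvAdd_def (r : List Int) (i a : Int) :
    PySem.List.pySetD r i (PySem.List.pyGetD r i 0 + a) = pvAdd r i a := rfl

theorem pvIdx?_lt {n : Nat} {i : Int} {j : Nat} (h : PySem.List.pyIdx? n i = some j) : j < n := by
  unfold PySem.List.pyIdx? at h
  split_ifs at h <;> simp_all <;> omega

theorem pvAdd_none {r : List Int} {i : Int} (a : Int)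
    (h : PySem.List.pyIdx? r.length i = none) : pvAdd r i a = r := by
  simp [pvAdd, PySem.List.pySetD, PySem.List.pySet?, h]

theorem pvAdd_some {r : List Int} {i : Int} {j : Nat} (a : Int)
    (h : PySem.List.pyIdx? r.length i = some j) :
    pvAdd r i a = r.set j (r.getD j 0 + a) := by
  have hj := pvIdx?_lt h
  simp [pvAdd, PySem.List.pySetD, PySem.List.pySet?, PySem.List.pyGetD, PySem.List.pyGet?, h,
    List.getD, List.getElem?_eq_getElem hj]

theorem length_pvAdd (r : List Int) (i a : Int) : (pvAdd r i a).length = r.length := by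
  cases h : PySem.List.pyIdx? r.length i with
  | none => rw [pvAdd_none a h]
  | some j => rw [pvAdd_some a h]; exact List.length_set ..

theorem pvAdd_merge (r : List Int) (i a b : Int) :
    pvAdd (pvAdd r i a) i b = pvAdd r i (a + b) := by
  cases h : PySem.List.pyIdx? r.length i with
  | none =>
    rw [pvAdd_none a h, pvAdd_none b h, pvAdd_none (a + b) h]
  | some j =>
    have hj := pvIdx?_lt h
    rw [pvAdd_some a h]
    have h2 : PySem.List.pyIdx? (r.set j (r.getD j 0 + a)).length i = some j := by
      simpa using h
    rw [pvAdd_some b h2, pvAdd_some (a + b) h]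
    simp only [List.getD, List.getElem?_set_eq_of_lt _ hj, Option.getD_some, List.set_set]
    congr 1
    have : r.getD j 0 = r[j]?.getD 0 := rfl
    ring

theorem pvAdd_comm (r : List Int) (i i' a b : Int) :
    pvAdd (pvAdd r i a) i' b = pvAdd (pvAdd r i' b) i a := by
  cases h : PySem.List.pyIdx? r.length i with
  | none =>
    have h2 : PySem.List.pyIdx? (pvAdd r i' b).length i = none := by rw [length_pvAdd]; exact h
    rw [pvAdd_none a h, pvAdd_none a h2]
  | some j =>
    cases h' : PySem.List.pyIdx? r.length i' with
    | none =>
      have h2 : PySem.List.pyIdx? (pvAdd r i a).length i' = none := by rw [length_pvAdd]; exact h'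
      rw [pvAdd_none b h2, pvAdd_none b h']
    | some j' =>
      have hj := pvIdx?_lt h
      have hj' := pvIdx?_lt h'
      rw [pvAdd_some a h, pvAdd_some b h']
      have hi : PySem.List.pyIdx? (r.set j (r.getD j 0 + a)).length i' = some j' := by
        simpa using h'
      have hi' : PySem.List.pyIdx? (r.set j' (r.getD j' 0 + b)).length i = some j := by
        simpa using h
      rw [pvAdd_some b hi, pvAdd_some a hi']
      by_cases hjj : j = j'
      · subst hjj
        simp only [List.getD, List.getElem?_set_eq_of_lt _ hj, Option.getD_some, List.set_set]
        congr 1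
        ring
      · simp only [List.getD]
        rw [List.getElem?_set_ne hjj, List.getElem?_set_ne (Ne.symm hjj), List.set_comm _ _ hjj]

-- push one pvAdd from the seed past a whole pvAdd-loop
theorem pvFoldl_pvAdd_shift {κ : Type} (idx : κ → Int) (c : κ → Int) (l : List κ) :
    ∀ (init : List Int) (i a : Int),
      l.foldl (fun r k => pvAdd r (idx k) (c k)) (pvAdd init i a)
        = pvAdd (l.foldl (fun r k => pvAdd r (idx k) (c k)) init) i a := by
  induction l with
  | nil => intro init i a; rfl
  | cons y l ih =>
    intro init i a
    simp only [List.foldl_cons]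
    rw [pvAdd_comm, ih]

-- bumping one key's count by 1 inside a Nodup key list = one extra pvAdd afterwards
theorem pvFoldl_bump (idx : String → Int) (s : List String) (hnd : s.Nodup) (x : String)
    (hx : x ∈ s) (c c' : String → Int)
    (h : ∀ k ∈ s, c' k = c k + if k = x then 1 else 0) :
    ∀ init : List Int,
      s.foldl (fun r k => pvAdd r (idx k) (c' k)) init
        = pvAdd (s.foldl (fun r k => pvAdd r (idx k) (c k)) init) (idx x) 1 := by
  induction s with
  | nil => cases hx
  | cons y s ih =>
    intro init
    simp only [List.foldl_cons]
    by_cases hyx : y = x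
    · subst hyx
      have hys : y ∉ s := (List.nodup_cons.mp hnd).1
      have hcy : c' y = c y + 1 := by simpa using h y (List.mem_cons_self ..)
      have hrest : ∀ k ∈ s, c' k = c k := by
        intro k hk
        have : k ≠ y := fun he => hys (he ▸ hk)
        simpa [this] using h k (List.mem_cons_of_mem _ hk)
      rw [PySem.List.foldl_congr_mem s _ (fun r k => pvAdd r (idx k) (c k)) _
        (fun acc k hk => by rw [hrest k hk])]
      rw [hcy, ← pvAdd_merge, pvFoldl_pvAdd_shift]
    · have hxs : x ∈ s := by
        cases hx with
        | head => exact absurd rfl hyx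
        | tail _ h => exact h
      have hcy : c' y = c y := by simpa [hyx] using h y (List.mem_cons_self ..)
      rw [hcy, ih (List.nodup_cons.mp hnd).2 hxs
        (fun k hk => h k (List.mem_cons_of_mem _ hk))]

-- scattering the distinct names with their total counts = adding 1 per occurrence
theorem pvScatter_eq (idx : String → Int) (names : List String) :
    ∀ init : List Int,
      (PySem.Set.ofList names).foldl
          (fun r k => pvAdd r (idx k) ((names.count k : Nat) : Int)) init
        = names.foldl (fun r k => pvAdd r (idx k) 1) init := by
  induction names using List.reverseRecOn with
  | nil => intro init; rfl
  | append_singleton names x ih =>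
    intro init
    rw [PySem.Set.ofList_append_singleton]
    by_cases hx : x ∈ PySem.Set.ofList names
    · rw [PySem.Set.add_of_mem hx]
      simp only [List.foldl_append, List.foldl_cons, List.foldl_nil]
      rw [pvFoldl_bump idx _ (PySem.Set.nodup_ofList names) x hx
        (fun k => ((names.count k : Nat) : Int))
        (fun k => (((names ++ [x]).count k : Nat) : Int))
        (fun k _ => by
          by_cases hkx : k = x
          · subst hkx; simp [List.count_append]
          · simp [List.count_append, hkx, Ne.symm hkx])]
      rw [ih]
    · have hxn : x ∉ names := fun hm => hx ((PySem.Set.mem_ofList names x).mpr hm)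
      rw [PySem.Set.add_of_not_mem hx]
      simp only [List.foldl_append, List.foldl_cons, List.foldl_nil]
      rw [PySem.List.foldl_congr_mem (PySem.Set.ofList names)
        (fun r k => pvAdd r (idx k) (((names ++ [x]).count k : Nat) : Int))
        (fun r k => pvAdd r (idx k) ((names.count k : Nat) : Int)) init
        (fun acc k hk => by
          have hkx : k ≠ x := fun he => hxn (he ▸ (PySem.Set.mem_ofList names k).mp hk)
          simp [List.count_append, Ne.symm hkx])]
      rw [ih]
      simp [List.count_append, List.count_eq_zero_of_not_mem hxn]

-- ===== VERDICT (by name: the statement is the Claim_ definition above) =====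
theorem get_classes_counter_spec : Claim_equal_get_classes_counter := by
  intro data_info classes_list class_to_idx_map _ _
  unfold Spec_get_classes_counter
  simp only [get_classes_counter, get_classes_counter_alt]
  rw [PySem.Dict.foldl_insert_getD_add_one_eq_counter, PySem.Dict.items_counter,
    List.foldl_map]
  simp only [pvAdd_def]
  rw [pvScatter_eq (fun k => (PySem.Dict.ofList class_to_idx_map).getD k 0)]
  rw [List.foldl_flatMap]
  simp only [List.foldl_map]
  congr 1
  simp [List.map_const']
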